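-- pv_equiv track=rewrite | github.com/mwouts/jupytext | src/jupytext/cell_reader.py | uncomment
-- ===== SOURCE A (Python) =====
-- def uncomment(lines, prefix="#", suffix=""):
--     """Remove prefix and space, or only prefix, when possible"""
--     if prefix:
--         prefix_and_space = prefix + " "
--         length_prefix = len(prefix)
--         length_prefix_and_space = len(prefix_and_space)
--         lines = [
--             line[length_prefix_and_space:]
--             if line.startswith(prefix_and_space)
--             else (line[length_prefix:] if line.startswith(prefix) else line)
--             for line in lines
--         ]
--
--     if suffix:
--         space_and_suffix = " " + suffix
--         length_suffix = len(suffix)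
--         length_space_and_suffix = len(space_and_suffix)
--         lines = [
--             line[:-length_space_and_suffix]
--             if line.endswith(space_and_suffix)
--             else (line[:-length_suffix] if line.endswith(suffix) else line)
--             for line in lines
--         ]
--
--     return lines
-- ===== SOURCE B (Python) =====
-- def uncomment(lines, prefix="#", suffix=""):
--     """Remove prefix and space, or only prefix, when possible"""
--     lp, ls = len(prefix), len(suffix)
--     out = []
--     for line in lines:
--         # compute the slice bounds arithmetically, then slice once
--         start, end = 0, len(line)
--         if lp and line[:lp] == prefix:
--             start = lp + 1 if line[lp:lp + 1] == " " else lp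
--         if ls and end - start >= ls and line[end - ls:end] == suffix:
--             end = end - ls - 1 if end - start > ls and line[end - ls - 1] == " " else end - ls
--         out.append(line[start:end])
--     return out
-- ===== Notes on version B (the rewrite author's own statement) =====
-- stated objective: alternative
-- what changed: A rewrites the lines twice (one comprehension peeling the prefix by startswith+slice, a second peeling the suffix by endswith+negative slice); B never rewrites intermediate strings: in a single loop it computes the final cut bounds start/end arithmetically by comparing slices/characters of the ORIGINAL line, then slices each line exactly once.
import Mathlib
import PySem

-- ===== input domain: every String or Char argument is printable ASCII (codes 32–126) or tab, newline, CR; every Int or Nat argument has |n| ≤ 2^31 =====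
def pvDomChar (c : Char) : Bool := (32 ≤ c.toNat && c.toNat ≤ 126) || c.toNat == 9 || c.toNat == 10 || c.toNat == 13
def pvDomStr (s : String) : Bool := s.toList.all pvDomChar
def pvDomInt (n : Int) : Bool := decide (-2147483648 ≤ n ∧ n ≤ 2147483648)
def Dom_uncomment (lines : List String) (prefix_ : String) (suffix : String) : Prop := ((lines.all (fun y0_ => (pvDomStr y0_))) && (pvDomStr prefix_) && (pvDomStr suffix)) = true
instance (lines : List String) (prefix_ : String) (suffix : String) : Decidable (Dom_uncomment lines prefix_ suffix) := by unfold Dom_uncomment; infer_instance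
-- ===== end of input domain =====

-- B replaces A's two line-rewriting passes by one loop that computes the final cut
-- bounds start/end arithmetically on each ORIGINAL line and slices it once
-- (objective: alternative decomposition, same cost).

-- ===== PORT A =====
def uncomment (lines : List String) (prefix_ : String) (suffix : String) : List String :=
  let lines1 :=
    if prefix_ ≠ "" then
      let prefix_and_space := prefix_ ++ " "
      let length_prefix := PySem.Str.len prefix_
      let length_prefix_and_space := PySem.Str.len prefix_and_space
      lines.map (fun line =>
        if PySem.Str.startswith line prefix_and_space then
          PySem.Str.slice line (some length_prefix_and_space) none
        else if PySem.Str.startswith line prefix_ then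
          PySem.Str.slice line (some length_prefix) none
        else line)
    else lines
  if suffix ≠ "" then
    let space_and_suffix := " " ++ suffix
    let length_suffix := PySem.Str.len suffix
    let length_space_and_suffix := PySem.Str.len space_and_suffix
    lines1.map (fun line =>
      if PySem.Str.endswith line space_and_suffix then
        PySem.Str.slice line none (some (-length_space_and_suffix))
      else if PySem.Str.endswith line suffix then
        PySem.Str.slice line none (some (-length_suffix))
      else line)
  else lines1

-- ===== PORT B =====
-- Python's `line[end-ls-1] == " "` compares the one-character string at that (in-range)
-- index with " "; ported exactly as pyGet? = some ' '.
def uncomment_alt (lines : List String) (prefix_ : String) (suffix : String) : List String :=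
  let lp := PySem.Str.len prefix_
  let ls := PySem.Str.len suffix
  lines.foldl (fun out line =>
    let start : Int := 0
    let end_ : Int := PySem.Str.len line
    let start :=
      if lp ≠ 0 ∧ PySem.Str.slice line none (some lp) = prefix_ then
        (if PySem.Str.slice line (some lp) (some (lp + 1)) = " " then lp + 1 else lp)
      else start
    let end_ :=
      if ls ≠ 0 ∧ ls ≤ end_ - start ∧ PySem.Str.slice line (some (end_ - ls)) (some end_) = suffix then
        (if ls < end_ - start ∧ PySem.Str.pyGet? line (end_ - ls - 1) = some ' ' then
          end_ - ls - 1
        else end_ - ls)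
      else end_
    out ++ [PySem.Str.slice line (some start) (some end_)]) []

-- ===== PRECONDITION & SPEC =====
def Spec_uncomment (lines : List String) (prefix_ : String) (suffix : String) (out : List String) : Prop := out = uncomment_alt lines prefix_ suffix
instance (lines : List String) (prefix_ : String) (suffix : String) (out : List String) : Decidable (Spec_uncomment lines prefix_ suffix out) := by unfold Spec_uncomment; infer_instance

-- ===== CLAIM (what is proved, stated in full; the proofs are below) =====
def Claim_equal_uncomment : Prop := ∀ (lines : List String) (prefix_ : String) (suffix : String), Dom_uncomment lines prefix_ suffix → Spec_uncomment lines prefix_ suffix (uncomment lines prefix_ suffix)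

-- ===== LEMMAS AND PROOFS =====

-- B's start bound, at the List Char level
def bStart (p cs : List Char) : Nat :=
  if cs.take p.length = p then
    (if (cs.drop p.length).take 1 = [' '] then p.length + 1 else p.length)
  else 0

-- B's end bound, at the List Char level (s = the start bound already cut)
def bEnd (q cs : List Char) (s : Nat) : Nat :=
  if q.length ≤ cs.length - s ∧ (cs.drop (cs.length - q.length)).take q.length = q then
    (if q.length < cs.length - s ∧ cs[cs.length - q.length - 1]? = some ' ' then
      cs.length - q.length - 1
    else cs.length - q.length)
  else cs.length

theorem bStart_le (p cs : List Char) : bStart p cs ≤ cs.length := by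
  unfold bStart
  split_ifs with h1 h2
  · have e1 := congrArg List.length h1
    have e2 := congrArg List.length h2
    simp [List.length_take, List.length_drop] at e1 e2
    omega
  · have e1 := congrArg List.length h1
    simp at e1
    omega
  · omega

-- prefix tests, reduced to take/drop form
theorem prefix_iff_take (p cs : List Char) : p <+: cs ↔ cs.take p.length = p := by
  rw [List.prefix_iff_eq_take, eq_comm]

theorem prefix_space_iff (p cs : List Char) :
    (p ++ [' ']) <+: cs ↔ cs.take p.length = p ∧ (cs.drop p.length).take 1 = [' '] := by
  constructor
  · intro h
    have hp : p <+: cs := (p.prefix_append [' ']).trans h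
    have htake : cs.take (p.length + 1) = p ++ [' '] := by
      have := (prefix_iff_take _ _).mp h
      simpa using this
    refine ⟨(prefix_iff_take _ _).mp hp, ?_⟩
    have hdt : (cs.take (p.length + 1)).drop p.length = (cs.drop p.length).take 1 := by
      rw [List.drop_take, Nat.add_sub_cancel_left]
    rw [← hdt, htake, List.drop_left]
  · rintro ⟨h1, h2⟩
    have : cs.take (p.length + 1) = p ++ [' '] := by
      rw [List.take_add, h1, h2]
    rw [prefix_iff_take]
    simpa using this

-- suffix test, reduced to drop/take form
theorem suffix_iff_drop_take (q cs : List Char) :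
    q <:+ cs ↔ q.length ≤ cs.length ∧ (cs.drop (cs.length - q.length)).take q.length = q := by
  constructor
  · intro h
    have hdrop : q = cs.drop (cs.length - q.length) := List.suffix_iff_eq_drop.mp h
    exact ⟨h.length_le, by rw [← hdrop, List.take_length]⟩
  · rintro ⟨hle, h⟩
    have hlen : (cs.drop (cs.length - q.length)).length ≤ q.length := by
      simp
      omega
    have hdrop : q = cs.drop (cs.length - q.length) := by
      conv_lhs => rw [← h]
      rw [List.take_of_length_le hlen]
    have hsuf : cs.drop (cs.length - q.length) <:+ cs := List.drop_suffix _ _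
    rwa [← hdrop] at hsuf

-- suffix test inside the already-stripped tail cs.drop s
theorem suffix_within (q cs : List Char) (s : Nat) (hs : s ≤ cs.length) :
    q <:+ cs.drop s ↔
      (q.length ≤ cs.length - s ∧ (cs.drop (cs.length - q.length)).take q.length = q) := by
  rw [suffix_iff_drop_take]
  constructor
  · rintro ⟨h1, h2⟩
    have h1' : q.length ≤ cs.length - s := by
      simpa using h1
    refine ⟨h1', ?_⟩
    rw [List.drop_drop,
      show s + ((cs.drop s).length - q.length) = cs.length - q.length by simp; omega] at h2
    exact h2
  · rintro ⟨h1, h2⟩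
    refine ⟨by simpa using h1, ?_⟩
    rw [List.drop_drop,
      show s + ((cs.drop s).length - q.length) = cs.length - q.length by simp; omega]
    exact h2

-- space-and-suffix test inside the already-stripped tail
theorem space_suffix_within (q cs : List Char) (s : Nat) (hs : s ≤ cs.length) :
    (' ' :: q) <:+ cs.drop s ↔
      (q.length < cs.length - s ∧ cs[cs.length - q.length - 1]? = some ' ' ∧
        (cs.drop (cs.length - q.length)).take q.length = q) := by
  rw [suffix_within (' ' :: q) cs s hs]
  constructor
  · rintro ⟨h1, h2⟩
    have h1' : q.length < cs.length - s := by
      simp at h1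
      omega
    have hb : cs.length - q.length - 1 < cs.length := by omega
    rw [show cs.length - (' ' :: q).length = cs.length - q.length - 1 by simp; omega,
      List.drop_eq_getElem_cons hb,
      show cs.length - q.length - 1 + 1 = cs.length - q.length by omega,
      show (' ' :: q).length = q.length + 1 from rfl, List.take_succ_cons] at h2
    injection h2 with hhd htl
    exact ⟨h1', by rw [List.getElem?_eq_some_iff]; exact ⟨hb, hhd⟩, htl⟩
  · rintro ⟨h1, h2, h3⟩
    have hb : cs.length - q.length - 1 < cs.length := by omega
    obtain ⟨_, hv⟩ := List.getElem?_eq_some_iff.mp h2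
    refine ⟨by simp; omega, ?_⟩
    rw [show cs.length - (' ' :: q).length = cs.length - q.length - 1 by simp; omega,
      List.drop_eq_getElem_cons hb,
      show cs.length - q.length - 1 + 1 = cs.length - q.length by omega,
      show (' ' :: q).length = q.length + 1 from rfl, List.take_succ_cons, hv, h3]

-- the A-side prefix pass drops exactly bStart characters
theorem prefix_pass_drop (p l : String) :
    (if PySem.Str.startswith l (p ++ " ") then
       PySem.Str.slice l (some (PySem.Str.len (p ++ " "))) none
     else if PySem.Str.startswith l p then
       PySem.Str.slice l (some (PySem.Str.len p)) none
     else l).toList = l.toList.drop (bStart p.toList l.toList) := by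
  have hlist : (p ++ " ").toList = p.toList ++ [' '] := by
    rw [String.toList_append]
    rfl
  unfold bStart
  by_cases h1 : l.toList.take p.toList.length = p.toList
  · by_cases h2 : (l.toList.drop p.toList.length).take 1 = [' ']
    · have hsw : PySem.Str.startswith l (p ++ " ") = true := by
        rw [PySem.Str.startswith_eq, PySem.Chars.startswith_iff, hlist]
        exact (prefix_space_iff _ _).mpr ⟨h1, h2⟩
      rw [if_pos hsw, if_pos h1, if_pos h2]
      rw [PySem.Str.toList_slice, PySem.Chars.slice_eq_listSlice, PySem.Str.len_eq, hlist]
      rw [show (p.toList ++ [' ']).length = p.toList.length + 1 by simp]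
      exact PySem.List.slice_from_natCast ..
    · have hsw : ¬ PySem.Str.startswith l (p ++ " ") = true := by
        rw [PySem.Str.startswith_eq, PySem.Chars.startswith_iff, hlist]
        intro hc
        exact h2 ((prefix_space_iff _ _).mp hc).2
      have hsw2 : PySem.Str.startswith l p = true := by
        rw [PySem.Str.startswith_eq, PySem.Chars.startswith_iff]
        exact (prefix_iff_take _ _).mpr h1
      rw [if_neg hsw, if_pos hsw2, if_pos h1, if_neg h2]
      rw [PySem.Str.toList_slice, PySem.Chars.slice_eq_listSlice, PySem.Str.len_eq]
      exact PySem.List.slice_from_natCast ..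
  · have hsw : ¬ PySem.Str.startswith l (p ++ " ") = true := by
      rw [PySem.Str.startswith_eq, PySem.Chars.startswith_iff, hlist]
      intro hc
      exact h1 ((prefix_space_iff _ _).mp hc).1
    have hsw2 : ¬ PySem.Str.startswith l p = true := by
      rw [PySem.Str.startswith_eq, PySem.Chars.startswith_iff]
      intro hc
      exact h1 ((prefix_iff_take _ _).mp hc)
    rw [if_neg hsw, if_neg hsw2, if_neg h1, List.drop_zero]

-- the A-side suffix pass on the prefix-stripped line l1 keeps exactly bEnd - s characters
theorem suffix_pass_take (q l1 l : String) (s : Nat) (hs : s ≤ l.toList.length)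
    (h1 : l1.toList = l.toList.drop s) (hq : q ≠ "") :
    (if PySem.Str.endswith l1 (" " ++ q) then
       PySem.Str.slice l1 none (some (-(PySem.Str.len (" " ++ q))))
     else if PySem.Str.endswith l1 q then
       PySem.Str.slice l1 none (some (-(PySem.Str.len q)))
     else l1).toList
    = (l.toList.drop s).take (bEnd q.toList l.toList s - s) := by
  have hq0 : 0 < q.toList.length := by
    cases hx : q.toList with
    | nil => exact absurd (by simpa using congrArg String.ofList hx) (by simpa using hq)
    | cons a t => simp
  have hlist : (" " ++ q).toList = ' ' :: q.toList := by
    rw [String.toList_append]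
    rfl
  have hm : l1.toList.length = l.toList.length - s := by
    rw [h1]
    simp
  unfold bEnd
  by_cases c1 : q.toList.length ≤ l.toList.length - s ∧
      (l.toList.drop (l.toList.length - q.toList.length)).take q.toList.length = q.toList
  · have hesw : PySem.Str.endswith l1 q = true := by
      rw [PySem.Str.endswith_eq, PySem.Chars.endswith_iff, h1]
      exact (suffix_within q.toList l.toList s hs).mpr c1
    by_cases c2 : q.toList.length < l.toList.length - s ∧
        l.toList[l.toList.length - q.toList.length - 1]? = some ' '
    · have hesw2 : PySem.Str.endswith l1 (" " ++ q) = true := by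
        rw [PySem.Str.endswith_eq, PySem.Chars.endswith_iff, hlist, h1]
        exact (space_suffix_within q.toList l.toList s hs).mpr ⟨c2.1, c2.2, c1.2⟩
      rw [if_pos c1, if_pos c2, if_pos hesw2]
      rw [PySem.Str.toList_slice, PySem.Chars.slice_eq_listSlice, PySem.Str.len_eq, hlist]
      rw [show ((' ' :: q.toList).length : Int) = ((q.toList.length + 1 : Nat) : Int) by simp]
      rw [PySem.List.slice_to_neg_natCast _ _ (by omega), hm, h1]
      congr 1
      omega
    · have hesw2 : ¬ PySem.Str.endswith l1 (" " ++ q) = true := by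
        rw [PySem.Str.endswith_eq, PySem.Chars.endswith_iff, hlist, h1]
        intro hc
        obtain ⟨ha, hb, _⟩ := (space_suffix_within q.toList l.toList s hs).mp hc
        exact c2 ⟨ha, hb⟩
      rw [if_pos c1, if_neg c2, if_neg hesw2, if_pos hesw]
      rw [PySem.Str.toList_slice, PySem.Chars.slice_eq_listSlice, PySem.Str.len_eq]
      rw [PySem.List.slice_to_neg_natCast _ _ (by omega), hm, h1]
      congr 1
      omega
  · have hesw : ¬ PySem.Str.endswith l1 q = true := by
      rw [PySem.Str.endswith_eq, PySem.Chars.endswith_iff, h1]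
      intro hc
      exact c1 ((suffix_within q.toList l.toList s hs).mp hc)
    have hesw2 : ¬ PySem.Str.endswith l1 (" " ++ q) = true := by
      rw [PySem.Str.endswith_eq, PySem.Chars.endswith_iff, hlist, h1]
      intro hc
      obtain ⟨ha, hb, hcq⟩ := (space_suffix_within q.toList l.toList s hs).mp hc
      exact c1 ⟨by omega, hcq⟩
    rw [if_neg c1, if_neg hesw2, if_neg hesw, h1]
    exact (List.take_of_length_le (by simp)).symm

-- B's start expression, as an Int, is the cast of the list-level bound
theorem b_start_eq (p l : String) :
    (if ¬PySem.Str.len p = 0 ∧ PySem.Str.slice l none (some (PySem.Str.len p)) = p then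
      if PySem.Str.slice l (some (PySem.Str.len p)) (some (PySem.Str.len p + 1)) = " " then
        PySem.Str.len p + 1
      else PySem.Str.len p
    else 0)
    = (((if p.toList = [] then 0 else bStart p.toList l.toList) : Nat) : Int) := by
  have hlen : PySem.Str.len p = ((p.toList.length : Nat) : Int) := by
    rw [PySem.Str.len_eq]
  by_cases hp : p.toList = []
  · have h0 : PySem.Str.len p = 0 := by
      rw [hlen, hp]
      simp
    rw [if_neg (by rintro ⟨hc, -⟩; exact hc h0), if_pos hp]
    simp
  · have hne : ¬ PySem.Str.len p = 0 := by
      rw [hlen]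
      simpa using hp
    have e1 : (PySem.Str.slice l none (some (PySem.Str.len p))).toList
        = l.toList.take p.toList.length := by
      rw [PySem.Str.toList_slice, PySem.Chars.slice_eq_listSlice, hlen,
        PySem.List.slice_to_natCast]
    have e2 : (PySem.Str.slice l (some (PySem.Str.len p)) (some (PySem.Str.len p + 1))).toList
        = (l.toList.drop p.toList.length).take 1 := by
      rw [PySem.Str.toList_slice, PySem.Chars.slice_eq_listSlice, hlen,
        show ((p.toList.length : Int) + 1) = ((p.toList.length : Int) + ((1 : Nat) : Int)) by norm_num,
        PySem.List.slice_natCast_add]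
    rw [if_neg hp]
    unfold bStart
    by_cases h1 : l.toList.take p.toList.length = p.toList
    · have c1 : PySem.Str.slice l none (some (PySem.Str.len p)) = p := by
        rw [← String.toList_inj, e1]
        exact h1
      by_cases h2 : (l.toList.drop p.toList.length).take 1 = [' ']
      · have c2 : PySem.Str.slice l (some (PySem.Str.len p)) (some (PySem.Str.len p + 1)) = " " := by
          rw [← String.toList_inj, e2]
          exact h2
        rw [if_pos ⟨hne, c1⟩, if_pos c2, if_pos h1, if_pos h2, hlen]
        push_cast
        ring
      · have c2 : ¬ PySem.Str.slice l (some (PySem.Str.len p)) (some (PySem.Str.len p + 1)) = " " := by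
          rw [← String.toList_inj, e2]
          exact h2
        rw [if_pos ⟨hne, c1⟩, if_neg c2, if_pos h1, if_neg h2, hlen]
    · have c1 : ¬ PySem.Str.slice l none (some (PySem.Str.len p)) = p := by
        rw [← String.toList_inj, e1]
        exact h1
      rw [if_neg (by rintro ⟨-, hc⟩; exact c1 hc), if_neg h1]
      simp

-- B's end expression (with the start already a cast) is the cast of the list-level bound
theorem b_end_eq (q l : String) (s : Nat) (hs : s ≤ l.toList.length) :
    (if ¬PySem.Str.len q = 0 ∧
        PySem.Str.len q ≤ PySem.Str.len l - ((s : Nat) : Int) ∧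
        PySem.Str.slice l (some (PySem.Str.len l - PySem.Str.len q)) (some (PySem.Str.len l)) = q then
      if PySem.Str.len q < PySem.Str.len l - ((s : Nat) : Int) ∧
          PySem.Str.pyGet? l (PySem.Str.len l - PySem.Str.len q - 1) = some ' ' then
        PySem.Str.len l - PySem.Str.len q - 1
      else PySem.Str.len l - PySem.Str.len q
    else PySem.Str.len l)
    = (((if q.toList = [] then l.toList.length else bEnd q.toList l.toList s) : Nat) : Int) := by
  have hlq : PySem.Str.len q = ((q.toList.length : Nat) : Int) := by
    rw [PySem.Str.len_eq]
  have hln : PySem.Str.len l = ((l.toList.length : Nat) : Int) := by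
    rw [PySem.Str.len_eq]
  by_cases hqn : q.toList = []
  · have h0 : PySem.Str.len q = 0 := by
      rw [hlq, hqn]
      simp
    rw [if_neg (by rintro ⟨hc, -⟩; exact hc h0), if_pos hqn, hln]
  · have hne : ¬ PySem.Str.len q = 0 := by
      rw [hlq]
      simpa using hqn
    rw [if_neg hqn]
    unfold bEnd
    by_cases d1 : q.toList.length ≤ l.toList.length - s
    · have clen : PySem.Str.len q ≤ PySem.Str.len l - ((s : Nat) : Int) := by
        rw [hlq, hln]
        omega
      have hcast : PySem.Str.len l - PySem.Str.len q
          = (((l.toList.length - q.toList.length : Nat)) : Int) := by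
        rw [hlq, hln]
        omega
      have eslice : (PySem.Str.slice l (some (PySem.Str.len l - PySem.Str.len q))
            (some (PySem.Str.len l))).toList
          = (l.toList.drop (l.toList.length - q.toList.length)).take q.toList.length := by
        rw [PySem.Str.toList_slice, PySem.Chars.slice_eq_listSlice, hcast, hln,
          PySem.List.slice_natCast,
          show l.toList.length - (l.toList.length - q.toList.length) = q.toList.length by omega]
      by_cases d2 : (l.toList.drop (l.toList.length - q.toList.length)).take q.toList.length
          = q.toList
      · have c1 : PySem.Str.slice l (some (PySem.Str.len l - PySem.Str.len q))
            (some (PySem.Str.len l)) = q := by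
          rw [← String.toList_inj, eslice]
          exact d2
        by_cases d3 : q.toList.length < l.toList.length - s
        · have eget : PySem.Str.pyGet? l (PySem.Str.len l - PySem.Str.len q - 1)
              = l.toList[l.toList.length - q.toList.length - 1]? := by
            rw [show PySem.Str.len l - PySem.Str.len q - 1
                = (((l.toList.length - q.toList.length - 1 : Nat)) : Int) by rw [hlq, hln]; omega]
            simp
          have clt : PySem.Str.len q < PySem.Str.len l - ((s : Nat) : Int) := by
            rw [hlq, hln]
            omega
          by_cases d4 : l.toList[l.toList.length - q.toList.length - 1]? = some ' '
          · have cget : PySem.Str.pyGet? l (PySem.Str.len l - PySem.Str.len q - 1) = some ' ' := by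
              rw [eget]
              exact d4
            rw [if_pos ⟨hne, clen, c1⟩, if_pos ⟨clt, cget⟩, if_pos ⟨d1, d2⟩, if_pos ⟨d3, d4⟩,
              hlq, hln]
            omega
          · rw [if_pos ⟨hne, clen, c1⟩,
              if_neg (show ¬ (PySem.Str.len q < PySem.Str.len l - ((s : Nat) : Int) ∧
                  PySem.Str.pyGet? l (PySem.Str.len l - PySem.Str.len q - 1) = some ' ') by
                rintro ⟨-, hc⟩
                rw [eget] at hc
                exact d4 hc),
              if_pos ⟨d1, d2⟩,
              if_neg (show ¬ (q.toList.length < l.toList.length - s ∧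
                  l.toList[l.toList.length - q.toList.length - 1]? = some ' ') by
                rintro ⟨-, hc⟩
                exact d4 hc),
              hlq, hln]
            omega
        · rw [if_pos ⟨hne, clen, c1⟩,
            if_neg (show ¬ (PySem.Str.len q < PySem.Str.len l - ((s : Nat) : Int) ∧
                PySem.Str.pyGet? l (PySem.Str.len l - PySem.Str.len q - 1) = some ' ') by
              rintro ⟨hc, -⟩
              rw [hlq, hln] at hc
              omega),
            if_pos ⟨d1, d2⟩,
            if_neg (show ¬ (q.toList.length < l.toList.length - s ∧
                l.toList[l.toList.length - q.toList.length - 1]? = some ' ') by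
              rintro ⟨hc, -⟩
              exact d3 hc),
            hlq, hln]
          omega
      · rw [if_neg (by
            rintro ⟨-, -, hc⟩
            rw [← String.toList_inj, eslice] at hc
            exact d2 hc),
          if_neg (by rintro ⟨-, hc⟩; exact d2 hc), hln]
    · rw [if_neg (by rintro ⟨-, hc, -⟩; rw [hlq, hln] at hc; omega),
        if_neg (by rintro ⟨hc, -⟩; omega), hln]

-- the final slice with two nonnegative bounds, on the list side
theorem slice_natnat_toList (l : String) (a b : Nat) :
    (PySem.Str.slice l (some ((a : Nat) : Int)) (some ((b : Nat) : Int))).toList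
      = (l.toList.drop a).take (b - a) := by
  rw [PySem.Str.toList_slice, PySem.Chars.slice_eq_listSlice, PySem.List.slice_natCast]

-- ===== VERDICT (by name: the statement is the Claim_ definition above) =====
theorem uncomment_spec : Claim_equal_uncomment := by
  intro lines p q _
  unfold Spec_uncomment uncomment uncomment_alt
  rw [PySem.List.foldl_append_singleton_eq_map, List.nil_append]
  by_cases hp : p = ""
  · have hpl : p.toList = [] := by simp [hp]
    by_cases hq : q = ""
    · have hql : q.toList = [] := by simp [hq]
      rw [if_neg (by simp [hq]), if_neg (by simp [hp])]
      symm
      calc List.map _ lines = List.map id lines := List.map_congr_left (by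
              intro line _
              rw [← String.toList_inj, b_start_eq, b_end_eq q line _ (by rw [if_pos hpl]; omega),
                slice_natnat_toList, if_pos hpl, if_pos hql, id_eq]
              simp)
        _ = lines := List.map_id lines
    · have hql : ¬ q.toList = [] := by simpa using hq
      rw [if_pos hq, if_neg (by simp [hp])]
      refine List.map_congr_left ?_
      intro line _
      rw [← String.toList_inj,
        suffix_pass_take q line line 0 (by omega) (by simp) hq,
        b_start_eq, b_end_eq q line _ (by rw [if_pos hpl]; omega),
        slice_natnat_toList, if_pos hpl, if_neg hql]
  · have hpl : ¬ p.toList = [] := by simpa using hp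
    by_cases hq : q = ""
    · have hql : q.toList = [] := by simp [hq]
      rw [if_neg (by simp [hq]), if_pos hp]
      refine List.map_congr_left ?_
      intro line _
      rw [← String.toList_inj, prefix_pass_drop p line,
        b_start_eq, b_end_eq q line _ (by rw [if_neg hpl]; exact bStart_le ..),
        slice_natnat_toList, if_neg hpl, if_pos hql]
      exact (List.take_of_length_le (by simp)).symm
    · have hql : ¬ q.toList = [] := by simpa using hq
      rw [if_pos hq, if_pos hp, List.map_map]
      refine List.map_congr_left ?_
      intro line _
      rw [← String.toList_inj, Function.comp_apply,
        suffix_pass_take q _ line (bStart p.toList line.toList) (bStart_le ..)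
          (prefix_pass_drop p line) hq,
        b_start_eq, b_end_eq q line _ (by rw [if_neg hpl]; exact bStart_le ..),
        slice_natnat_toList, if_neg hpl, if_neg hql]
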